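-- pv_equiv track=rewrite | github.com/DL-maker/Grade_academy_dnb | Academy.py | tableaux_liees
-- ===== SOURCE A (Python) =====
-- def tableaux_liees(columns, colonnes_trouvees):
--     Liste = []
--     for trouve in colonnes_trouvees:
--         for key, valeurs in columns.items():
--             if key != "Specifiques":
--                 if trouve in valeurs and key not in Liste:
--                     Liste.append(key)
--     return Liste
-- ===== SOURCE B (Python) =====
-- def tableaux_liees(columns, colonnes_trouvees):
--     # Inverted index: value -> list of column keys (in column order), built once.
--     index = {}
--     for key, valeurs in columns.items():
--         if key != "Specifiques":
--             for v in dict.fromkeys(valeurs):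
--                 index.setdefault(v, []).append(key)
--     seen = set()
--     out = []
--     for trouve in colonnes_trouvees:
--         for key in index.get(trouve, []):
--             if key not in seen:
--                 seen.add(key)
--                 out.append(key)
--     return out
-- ===== Notes on version B (the rewrite author's own statement) =====
-- stated objective: faster
-- what changed: Replaces the rescan of every column for every found value by a value->keys inverted index built once, plus a set for ordered dedup instead of 'key not in Liste' list scans.
import Mathlib
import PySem

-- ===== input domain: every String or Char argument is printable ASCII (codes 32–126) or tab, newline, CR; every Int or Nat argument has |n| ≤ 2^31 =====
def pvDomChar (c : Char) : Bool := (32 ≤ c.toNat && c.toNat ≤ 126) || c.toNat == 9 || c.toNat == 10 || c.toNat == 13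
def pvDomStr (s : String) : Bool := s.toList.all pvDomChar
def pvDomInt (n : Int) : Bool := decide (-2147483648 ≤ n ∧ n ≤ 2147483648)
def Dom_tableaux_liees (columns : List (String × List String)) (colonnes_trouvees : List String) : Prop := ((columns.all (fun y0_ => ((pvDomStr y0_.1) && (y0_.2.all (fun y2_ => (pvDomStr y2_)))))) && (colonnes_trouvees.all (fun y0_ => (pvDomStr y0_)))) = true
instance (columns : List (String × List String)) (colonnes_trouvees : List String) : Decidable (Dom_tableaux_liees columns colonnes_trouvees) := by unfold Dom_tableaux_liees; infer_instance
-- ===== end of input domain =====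

-- B replaces A's rescan of all columns per found value by a value->keys inverted index built once
-- plus a set for ordered dedup (objective: faster).


-- ===== PORT A =====
def tableaux_liees (columns : List (String × List String)) (colonnes_trouvees : List String) : List String :=
  colonnes_trouvees.foldl (fun Liste trouve =>
    columns.foldl (fun Liste kv =>
      if kv.1 ≠ "Specifiques" then
        if kv.2.contains trouve && !Liste.contains kv.1 then Liste ++ [kv.1] else Liste
      else Liste) Liste) []

-- ===== PORT B =====
-- value -> list of column keys containing it (column order); dict.fromkeys(valeurs) = PySem.List.dedup
def pvIndex (columns : List (String × List String)) : PySem.Dict String (List String) :=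
  columns.foldl (fun idx kv =>
    if kv.1 ≠ "Specifiques" then
      (PySem.List.dedup kv.2).foldl (fun idx v => idx.insert v (idx.getD v [] ++ [kv.1])) idx
    else idx) PySem.Dict.empty

def tableaux_liees_alt (columns : List (String × List String)) (colonnes_trouvees : List String) : List String :=
  let index := pvIndex columns
  (colonnes_trouvees.foldl (fun (p : PySem.Set String × List String) trouve =>
      (index.getD trouve []).foldl (fun (p : PySem.Set String × List String) key =>
        if PySem.Set.contains p.1 key then p else (PySem.Set.add p.1 key, p.2 ++ [key])) p)
    ((PySem.Set.empty : PySem.Set String), ([] : List String))).2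

-- ===== PRECONDITION & SPEC =====
def Spec_tableaux_liees (columns : List (String × List String)) (colonnes_trouvees : List String) (out : List String) : Prop := out = tableaux_liees_alt columns colonnes_trouvees
instance (columns : List (String × List String)) (colonnes_trouvees : List String) (out : List String) : Decidable (Spec_tableaux_liees columns colonnes_trouvees out) := by unfold Spec_tableaux_liees; infer_instance

-- ===== CLAIM (what is proved, stated in full; the proofs are below) =====
def Claim_equal_tableaux_liees : Prop := ∀ (columns : List (String × List String)) (colonnes_trouvees : List String), Dom_tableaux_liees columns colonnes_trouvees → Spec_tableaux_liees columns colonnes_trouvees (tableaux_liees columns colonnes_trouvees)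

-- ===== LEMMAS AND PROOFS =====

/-- The keys (in column order) of the non-"Specifiques" columns containing `t`. -/
def pvKeysFor (columns : List (String × List String)) (t : String) : List String :=
  (columns.filter (fun kv => kv.1 != "Specifiques" && kv.2.contains t)).map Prod.fst

/-- Ordered dedup-append step shared by both sides' meaning. -/
def pvDapp (L : List String) (k : String) : List String :=
  if L.contains k then L else L ++ [k]

lemma getD_inner (l : List String) (k : String) (t : String) (hl : l.Nodup) :
    ∀ idx : PySem.Dict String (List String),
      (l.foldl (fun idx v => idx.insert v (idx.getD v [] ++ [k])) idx).getD t []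
        = idx.getD t [] ++ (if t ∈ l then [k] else []) := by
  induction l with
  | nil => intro idx; simp
  | cons v vs ih =>
    intro idx
    rw [List.foldl_cons, ih (List.Nodup.of_cons hl)]
    by_cases hv : t = v
    · subst hv
      have hnot : t ∉ vs := (List.nodup_cons.mp hl).1
      simp [hnot, PySem.Dict.getD_insert_self]
    · simp [PySem.Dict.getD_insert, hv]

lemma getD_index_fold (columns : List (String × List String)) (t : String) :
    ∀ idx : PySem.Dict String (List String),
      (columns.foldl (fun idx kv =>
        if kv.1 ≠ "Specifiques" then
          (PySem.List.dedup kv.2).foldl (fun idx v => idx.insert v (idx.getD v [] ++ [kv.1])) idx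
        else idx) idx).getD t []
      = idx.getD t [] ++ pvKeysFor columns t := by
  induction columns with
  | nil => intro idx; simp [pvKeysFor]
  | cons kv cols ih =>
    intro idx
    rw [List.foldl_cons, ih]
    by_cases hs : kv.1 = "Specifiques"
    · rw [if_neg (fun h => h hs)]
      have hk : pvKeysFor (kv :: cols) t = pvKeysFor cols t := by
        simp [pvKeysFor, hs]
      rw [hk]
    · rw [if_pos hs, getD_inner _ _ _ (PySem.List.nodup_dedup kv.2)]
      by_cases hm : t ∈ kv.2
      · rw [if_pos ((PySem.List.mem_dedup _ _).mpr hm)]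
        have hk : pvKeysFor (kv :: cols) t = kv.1 :: pvKeysFor cols t := by
          simp [pvKeysFor, hs, hm]
        rw [hk]
        simp
      · rw [if_neg (fun h => hm ((PySem.List.mem_dedup _ _).mp h))]
        have hk : pvKeysFor (kv :: cols) t = pvKeysFor cols t := by
          simp [pvKeysFor, hm]
        rw [hk, List.append_nil]

lemma getD_pvIndex (columns : List (String × List String)) (t : String) :
    (pvIndex columns).getD t [] = pvKeysFor columns t := by
  unfold pvIndex
  rw [getD_index_fold]
  simp

lemma innerA_eq (columns : List (String × List String)) (t : String) :
    ∀ L : List String,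
      columns.foldl (fun Liste kv =>
        if kv.1 ≠ "Specifiques" then
          if kv.2.contains t && !Liste.contains kv.1 then Liste ++ [kv.1] else Liste
        else Liste) L
      = (pvKeysFor columns t).foldl pvDapp L := by
  induction columns with
  | nil => intro L; simp [pvKeysFor]
  | cons kv cols ih =>
    intro L
    rw [List.foldl_cons]
    by_cases hs : kv.1 = "Specifiques"
    · rw [if_neg (fun h => h hs)]
      have hk : pvKeysFor (kv :: cols) t = pvKeysFor cols t := by
        simp [pvKeysFor, hs]
      rw [hk, ih]
    · rw [if_pos hs]
      by_cases hm : t ∈ kv.2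
      · have hk : pvKeysFor (kv :: cols) t = kv.1 :: pvKeysFor cols t := by
          simp [pvKeysFor, hs, hm]
        rw [hk, List.foldl_cons, ih]
        congr 1
        by_cases hL : kv.1 ∈ L <;> simp [pvDapp, hm, hL]
      · have hk : pvKeysFor (kv :: cols) t = pvKeysFor cols t := by
          simp [pvKeysFor, hm]
        rw [hk]
        have : (kv.2.contains t && !L.contains kv.1) = false := by
          simp [hm]
        rw [this, if_neg (by simp), ih]

lemma step_fold (ks : List String) :
    ∀ L : List String,
      ks.foldl (fun (p : PySem.Set String × List String) key =>
        if PySem.Set.contains p.1 key then p else (PySem.Set.add p.1 key, p.2 ++ [key]))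
        (PySem.Set.ofList L, L)
      = (PySem.Set.ofList (ks.foldl pvDapp L), ks.foldl pvDapp L) := by
  induction ks with
  | nil => intro L; simp
  | cons k ks ih =>
    intro L
    rw [List.foldl_cons, List.foldl_cons]
    by_cases hL : k ∈ L
    · have h1 : PySem.Set.contains (PySem.Set.ofList L) k = true := by
        simp [PySem.Set.contains, PySem.Set.mem_ofList, hL]
      have hd : pvDapp L k = L := by simp [pvDapp, hL]
      rw [hd, if_pos h1]
      exact ih L
    · have h1 : ¬ (PySem.Set.contains (PySem.Set.ofList L) k = true) := by
        simp [PySem.Set.contains, PySem.Set.mem_ofList, hL]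
      have hadd : PySem.Set.add (PySem.Set.ofList L) k = PySem.Set.ofList (L ++ [k]) := by
        rw [PySem.Set.ofList_eq_foldl, PySem.Set.ofList_eq_foldl, List.foldl_append]
        simp
      have hd : pvDapp L k = L ++ [k] := by simp [pvDapp, hL]
      rw [hd, if_neg h1, hadd]
      exact ih (L ++ [k])

lemma outer_fold (columns : List (String × List String)) (ts : List String) :
    ∀ L : List String,
      ts.foldl (fun (p : PySem.Set String × List String) trouve =>
        ((pvIndex columns).getD trouve []).foldl (fun (p : PySem.Set String × List String) key =>
          if PySem.Set.contains p.1 key then p else (PySem.Set.add p.1 key, p.2 ++ [key])) p)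
        (PySem.Set.ofList L, L)
      = (PySem.Set.ofList (ts.foldl (fun L t => (pvKeysFor columns t).foldl pvDapp L) L),
         ts.foldl (fun L t => (pvKeysFor columns t).foldl pvDapp L) L) := by
  induction ts with
  | nil => intro L; rfl
  | cons t ts ih =>
    intro L
    rw [List.foldl_cons, List.foldl_cons, getD_pvIndex, step_fold]
    exact ih _

lemma outerA_eq (columns : List (String × List String)) (ts : List String) :
    ∀ L : List String,
      ts.foldl (fun Liste trouve =>
        columns.foldl (fun Liste kv =>
          if kv.1 ≠ "Specifiques" then
            if kv.2.contains trouve && !Liste.contains kv.1 then Liste ++ [kv.1] else Liste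
          else Liste) Liste) L
      = ts.foldl (fun L t => (pvKeysFor columns t).foldl pvDapp L) L := by
  induction ts with
  | nil => intro L; rfl
  | cons t ts ih =>
    intro L
    rw [List.foldl_cons, List.foldl_cons, innerA_eq]
    exact ih _

-- ===== VERDICT (by name: the statement is the Claim_ definition above) =====
theorem tableaux_liees_spec : Claim_equal_tableaux_liees := by
  intro columns ts _
  unfold Spec_tableaux_liees tableaux_liees
  simp only [tableaux_liees_alt]
  have h0 : (PySem.Set.empty : PySem.Set String) = PySem.Set.ofList [] := rfl
  rw [h0, outer_fold]
  exact outerA_eq columns ts []
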